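-- pv_equiv track=rewrite | github.com/MrNobody2046/revolutionary-road | mind-garden/ijk.py | ijk
-- ===== SOURCE A (Python) =====
-- def ijk(array):
--     length = len(array)
--     ret = []
--     cnt = []
--
--     def _find(idx, selected):
--         if selected <= 0:
--             cnt.append("")
--             # print "Found:", ret
--         else:
--             for i in range(idx, length):
--                 # Ai Aj Ak 符合 Ai<Aj<Ak的顺序的情况：ret and array[i] > ret[-1] or not ret:
--                 if (len(ret) == 2 and array[i] < ret[-1]) or \
--                         (not ret or (len(ret) != 2 and array[i] > ret[-1])):
--                     ret.append(array[i])
--                     _find(i, selected - 1)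
--                     ret.pop()
--
--     _find(0, 3)
--     return len(cnt)
-- ===== SOURCE B (Python) =====
-- def ijk(array):
--     # Count triples i<j<k with array[i] < array[j] > array[k]:
--     # for each middle index j, multiply (# smaller to the left) by (# smaller to the right).
--     n = len(array)
--     total = 0
--     for j in range(n):
--         aj = array[j]
--         left = sum(1 for i in range(j) if array[i] < aj)
--         right = sum(1 for k in range(j + 1, n) if array[k] < aj)
--         total += left * right
--     return total
-- ===== Notes on version B (the rewrite author's own statement) =====
-- stated objective: faster
-- what changed: A enumerates all value-pattern triples by depth-3 backtracking recursion; B instead, for each middle index j, multiplies the count of smaller elements to its left by the count of smaller elements to its right and sums the products.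
import Mathlib
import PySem

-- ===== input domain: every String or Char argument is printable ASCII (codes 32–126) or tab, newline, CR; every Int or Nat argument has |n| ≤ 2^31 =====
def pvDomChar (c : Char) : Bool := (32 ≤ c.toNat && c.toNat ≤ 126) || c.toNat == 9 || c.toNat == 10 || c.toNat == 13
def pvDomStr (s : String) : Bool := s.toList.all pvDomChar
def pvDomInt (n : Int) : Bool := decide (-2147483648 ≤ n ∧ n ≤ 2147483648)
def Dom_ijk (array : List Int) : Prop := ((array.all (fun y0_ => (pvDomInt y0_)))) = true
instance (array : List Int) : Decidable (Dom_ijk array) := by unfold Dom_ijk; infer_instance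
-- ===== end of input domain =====

-- B replaces A's depth-3 backtracking enumeration of all triples (O(n^3)) by a per-middle-element
-- product of left-smaller and right-smaller counts (O(n^2)).

-- ===== PORT A =====
-- the if-condition of A's inner loop (ret[-1] ported as PySem.List.pyGetD ret (-1) 0;
-- Python only evaluates ret[-1] when ret is nonempty, so the default is never the decider)
def ijkCond (ret : List Int) (ai : Int) : Bool :=
  (ret.length == 2 && decide (ai < PySem.List.pyGetD ret (-1) 0))
  || (ret.isEmpty || (!(ret.length == 2) && decide (ai > PySem.List.pyGetD ret (-1) 0)))

-- A's recursive _find; `cnt` is ported as the returned count of leaf visits,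
-- `ret`'s append/pop pair as passing `ret ++ [array[i]]` to the recursive call
def ijkFind (array : List Int) (length idx selected : Int) (ret : List Int) : Int :=
  if _h : selected ≤ 0 then 1
  else
    (PySem.List.pyRange idx length 1).foldl
      (fun acc i =>
        if ijkCond ret (PySem.List.pyGetD array i 0) then
          acc + ijkFind array length i (selected - 1) (ret ++ [PySem.List.pyGetD array i 0])
        else acc) 0
termination_by selected.toNat
decreasing_by omega

def ijk (array : List Int) : Int := ijkFind array (array.length : Int) 0 3 []

-- ===== PORT B =====
def ijk_alt (array : List Int) : Int :=
  let n := array.length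
  (List.range n).foldl
    (fun total j =>
      let aj := array.getD j 0
      let left := ((List.range j).filter (fun i => decide (array.getD i 0 < aj))).length
      let right := ((List.range' (j + 1) (n - (j + 1))).filter
        (fun k => decide (array.getD k 0 < aj))).length
      total + (left : Int) * (right : Int)) 0

-- ===== PRECONDITION & SPEC =====
def Spec_ijk (array : List Int) (out : Int) : Prop := out = ijk_alt array
instance (array : List Int) (out : Int) : Decidable (Spec_ijk array out) := by unfold Spec_ijk; infer_instance

-- ===== CLAIM (what is proved, stated in full; the proofs are below) =====
def Claim_equal_ijk : Prop := ∀ (array : List Int), Dom_ijk array → Spec_ijk array (ijk array)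

-- ===== LEMMAS AND PROOFS =====

-- loop shape: a conditional-accumulate foldl is a sum
theorem pv_foldl_ite_add (l : List Int) (p : Int → Bool) (F : Int → Int) (a : Int) :
    l.foldl (fun acc i => if p i then acc + F i else acc) a
      = a + (l.map (fun i => if p i then F i else 0)).sum := by
  induction l generalizing a with
  | nil => simp
  | cons x xs ih => simp only [List.foldl_cons, List.map_cons, List.sum_cons, ih]; split <;> ring

theorem pv_foldl_add_sum (l : List Nat) (F : Nat → Int) (a : Int) :
    l.foldl (fun acc j => acc + F j) a = a + (l.map F).sum := by
  induction l generalizing a with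
  | nil => simp
  | cons x xs ih => simp only [List.foldl_cons, List.map_cons, List.sum_cons, ih]; ring

theorem pv_sum_map_range (n : Nat) (f : Nat → Int) :
    ((List.range n).map f).sum = ∑ i ∈ Finset.range n, f i := by
  induction n with
  | zero => simp
  | succ m ih => simp [List.range_succ, Finset.sum_range_succ, ih]

theorem pv_sum_map_pyRange (s n : Nat) (f : Int → Int) :
    ((PySem.List.pyRange (s : Int) (n : Int) 1).map f).sum = ∑ t ∈ Finset.Ico s n, f (t : Int) := by
  rw [PySem.List.pyRange_one, List.map_map, pv_sum_map_range, Finset.sum_Ico_eq_sum_range]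
  have h : ((n : Int) - (s : Int)).toNat = n - s := by omega
  rw [h]
  refine Finset.sum_congr rfl (fun t _ => ?_)
  norm_cast

theorem ijkCond_nil (ai : Int) : ijkCond [] ai = true := by
  simp [ijkCond]

theorem ijkCond_one (x ai : Int) : ijkCond [x] ai = decide (x < ai) := by
  simp [ijkCond, PySem.List.pyGetD, PySem.List.pyGet?, PySem.List.pyIdx?]

theorem ijkCond_two (x v ai : Int) : ijkCond [x, v] ai = decide (ai < v) := by
  simp [ijkCond, PySem.List.pyGetD, PySem.List.pyGet?, PySem.List.pyIdx?]

theorem ijkFind_zero (a : List Int) (len i : Int) (ret : List Int) :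
    ijkFind a len i 0 ret = 1 := by
  rw [ijkFind]; norm_num

theorem ijkFind_one (a : List Int) (n s : Nat) (x v : Int) :
    ijkFind a (n : Int) (s : Int) 1 [x, v]
      = ∑ k ∈ Finset.Ico s n, if a.getD k 0 < v then (1 : Int) else 0 := by
  rw [ijkFind, dif_neg (by norm_num : ¬ (1:Int) ≤ 0)]
  rw [pv_foldl_ite_add, zero_add, pv_sum_map_pyRange]
  apply Finset.sum_congr rfl
  intro t _
  simp [ijkCond_two, ijkFind_zero]

theorem ijkFind_two (a : List Int) (n s : Nat) (x : Int) :
    ijkFind a (n : Int) (s : Int) 2 [x]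
      = ∑ j ∈ Finset.Ico s n, if x < a.getD j 0 then
          (∑ k ∈ Finset.Ico j n, if a.getD k 0 < a.getD j 0 then (1 : Int) else 0) else 0 := by
  rw [ijkFind, dif_neg (by norm_num : ¬ (2:Int) ≤ 0)]
  rw [pv_foldl_ite_add, zero_add, pv_sum_map_pyRange]
  apply Finset.sum_congr rfl
  intro j _
  have h21 : (2 : Int) - 1 = 1 := by norm_num
  simp only [h21, List.singleton_append, ijkCond_one, PySem.List.pyGetD_natCast]
  rw [ijkFind_one]
  simp

theorem ijk_eq_sum (a : List Int) :
    ijk a = ∑ i ∈ Finset.Ico 0 a.length, ∑ j ∈ Finset.Ico i a.length,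
      (if a.getD i 0 < a.getD j 0 then
        (∑ k ∈ Finset.Ico j a.length, if a.getD k 0 < a.getD j 0 then (1 : Int) else 0) else 0) := by
  rw [ijk, ijkFind, dif_neg (by norm_num : ¬ (3:Int) ≤ 0)]
  rw [pv_foldl_ite_add, zero_add]
  rw [show (0 : Int) = ((0 : Nat) : Int) by norm_num, pv_sum_map_pyRange]
  apply Finset.sum_congr rfl
  intro i _
  have h32 : (3 : Int) - 1 = 2 := by norm_num
  simp only [h32, List.nil_append, ijkCond_nil, if_true, PySem.List.pyGetD_natCast]
  rw [ijkFind_two]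
  norm_cast

theorem pv_length_filter_range (m : Nat) (p : Nat → Bool) :
    ((((List.range m).filter p).length : Nat) : Int)
      = ∑ i ∈ Finset.range m, if p i then (1 : Int) else 0 := by
  induction m with
  | zero => simp
  | succ t ih =>
    rw [List.range_succ, List.filter_append, List.length_append, Finset.sum_range_succ, ← ih]
    by_cases h : p t <;> simp [h]

theorem pv_length_filter_range' (s m : Nat) (p : Nat → Bool) :
    ((((List.range' s m).filter p).length : Nat) : Int)
      = ∑ i ∈ Finset.Ico s (s + m), if p i then (1 : Int) else 0 := by
  induction m with
  | zero => simp
  | succ t ih =>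
    rw [List.range'_concat]
    simp only [one_mul]
    rw [List.filter_append, List.length_append,
      show s + (t + 1) = (s + t) + 1 from rfl, Finset.sum_Ico_succ_top (by omega), ← ih]
    by_cases h : p (s + t) <;> simp [h]

theorem ijk_alt_eq_sum (a : List Int) :
    ijk_alt a = ∑ j ∈ Finset.range a.length,
      (∑ i ∈ Finset.range j, if a.getD i 0 < a.getD j 0 then (1 : Int) else 0)
        * (∑ k ∈ Finset.Ico (j + 1) a.length, if a.getD k 0 < a.getD j 0 then (1 : Int) else 0) := by
  rw [ijk_alt]
  rw [pv_foldl_add_sum, pv_sum_map_range]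
  simp only [zero_add]
  refine Finset.sum_congr rfl (fun j hj => ?_)
  have hj' : j < a.length := Finset.mem_range.mp hj
  rw [pv_length_filter_range, pv_length_filter_range']
  have : (j + 1) + (a.length - (j + 1)) = a.length := by omega
  rw [this]
  simp

-- the combinatorial core: swap the (i, j) summation order
theorem pv_swap (n : Nat) (G : Nat → Int) :
    (∑ i ∈ Finset.Ico 0 n, ∑ j ∈ Finset.Ico i n,
      (if G i < G j then (∑ k ∈ Finset.Ico j n, if G k < G j then (1 : Int) else 0) else 0))
    = ∑ j ∈ Finset.range n,
      (∑ i ∈ Finset.range j, if G i < G j then (1 : Int) else 0)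
        * (∑ k ∈ Finset.Ico (j + 1) n, if G k < G j then (1 : Int) else 0) := by
  rw [Finset.sum_Ico_Ico_comm]
  rw [← Finset.range_eq_Ico]
  refine Finset.sum_congr rfl (fun j hj => ?_)
  have hj' : j < n := Finset.mem_range.mp hj
  have hR : (∑ k ∈ Finset.Ico j n, if G k < G j then (1 : Int) else 0)
      = ∑ k ∈ Finset.Ico (j + 1) n, if G k < G j then (1 : Int) else 0 := by
    rw [Finset.sum_eq_sum_Ico_succ_bot hj']
    simp
  rw [Finset.sum_range_succ]
  simp only [lt_irrefl, if_false, add_zero]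
  calc (∑ i ∈ Finset.range j,
          if G i < G j then (∑ k ∈ Finset.Ico j n, if G k < G j then (1 : Int) else 0) else 0)
      = ∑ i ∈ Finset.range j,
          (if G i < G j then (1 : Int) else 0)
            * (∑ k ∈ Finset.Ico j n, if G k < G j then (1 : Int) else 0) := by
        refine Finset.sum_congr rfl (fun i _ => ?_); split <;> ring
    _ = (∑ i ∈ Finset.range j, if G i < G j then (1 : Int) else 0)
          * (∑ k ∈ Finset.Ico j n, if G k < G j then (1 : Int) else 0) := by
        rw [Finset.sum_mul]
    _ = _ := by rw [hR]

-- ===== VERDICT (by name: the statement is the Claim_ definition above) =====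
theorem ijk_spec : Claim_equal_ijk := by
  intro array _hdom
  unfold Spec_ijk
  rw [ijk_eq_sum, ijk_alt_eq_sum, pv_swap]
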